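-- pv_equiv track=rewrite | github.com/mingatlasai/Paper2Code | codes/3.2_readme.py | get_file_tree
-- ===== SOURCE A (Python) =====
-- from typing import Dict, List
--
-- def get_file_tree(files: List[str]) -> str:
--     tree: Dict[str, dict] = {}
--     for path in sorted(files):
--         node = tree
--         parts = [p for p in path.split("/") if p]
--         for part in parts:
--             node = node.setdefault(part, {})
--
--     lines: List[str] = ["."]
--
--     def walk(node: Dict[str, dict], prefix: str) -> None:
--         keys = sorted(node.keys())
--         for idx, key in enumerate(keys):
--             is_last = idx == len(keys) - 1
--             connector = "└── " if is_last else "├── "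
--             lines.append(f"{prefix}{connector}{key}")
--             next_prefix = f"{prefix}{'    ' if is_last else '│   '}"
--             walk(node[key], next_prefix)
--
--     walk(tree, "")
--     return "\n".join(lines)
-- ===== SOURCE B (Python) =====
-- def get_file_tree(files):
--     paths = sorted({tuple(p for p in f.split("/") if p) for f in files} - {()})
--
--     def render(suffixes, prefix):
--         out = []
--         i, n = 0, len(suffixes)
--         while i < n:
--             key = suffixes[i][0]
--             j = i
--             while j < n and suffixes[j][0] == key:
--                 j += 1
--             group = [t[1:] for t in suffixes[i:j] if len(t) > 1]
--             last = j == n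
--             out.append(prefix + ("\u2514\u2500\u2500 " if last else "\u251c\u2500\u2500 ") + key)
--             out.extend(render(group, prefix + ("    " if last else "\u2502   ")))
--             i = j
--         return out
--
--     return "\n".join(["."] + render(paths, ""))
-- ===== Notes on version B (the rewrite author's own statement) =====
-- stated objective: alternative
-- what changed: A builds a nested dict trie by repeated setdefault and walks it with a recursive sorted-keys closure; B never builds a tree: it sorts the deduplicated list of path-segment tuples once and renders it by recursively splitting off the leading same-head group, deriving the last-sibling flag from whether anything follows the group.
import Mathlib
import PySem

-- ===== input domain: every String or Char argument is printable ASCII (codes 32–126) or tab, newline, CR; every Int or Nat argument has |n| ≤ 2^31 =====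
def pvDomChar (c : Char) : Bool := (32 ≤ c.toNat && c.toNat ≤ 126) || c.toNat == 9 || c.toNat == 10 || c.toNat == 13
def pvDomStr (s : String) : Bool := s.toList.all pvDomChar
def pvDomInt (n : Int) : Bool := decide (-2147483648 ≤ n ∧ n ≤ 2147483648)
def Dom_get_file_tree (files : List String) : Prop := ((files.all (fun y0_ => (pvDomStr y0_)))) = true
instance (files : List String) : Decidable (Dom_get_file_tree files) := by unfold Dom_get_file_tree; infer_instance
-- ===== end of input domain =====

-- B replaces A's mutated nested-dict trie by one sorted deduplicated list of path tuples
-- rendered with recursive grouping by head segment (objective: alternative, same result).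


-- ===== PORT A =====
-- The nested dict tree : Dict[str, dict] is an association-list trie in insertion order.
inductive Forest where
  | nil : Forest
  | cons (key : String) (child : Forest) (rest : Forest) : Forest
deriving Repr, DecidableEq

def pvKeys : Forest → List String
  | .nil => []
  | .cons k _ r => k :: pvKeys r

-- node[key] (with {} for a missing key — walk only looks up present keys)
def pvChildD : Forest → String → Forest
  | .nil, _ => .nil
  | .cons k c r, q => if k = q then c else pvChildD r q

-- the inner `for part in parts: node = node.setdefault(part, {})` loop, as the functional
-- update it performs on the tree
def pvInsert : Forest → List String → Forest
  | F, [] => F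
  | .nil, p :: ps => .cons p (pvInsert .nil ps) .nil
  | .cons k c r, p :: ps =>
      if k = p then .cons k (pvInsert c ps) r else .cons k c (pvInsert r (p :: ps))
termination_by F l => (l.length, sizeOf F)
decreasing_by all_goals
  first
  | (apply Prod.Lex.left; simp; done)
  | (apply Prod.Lex.right; simp)

theorem pvChildD_sizeOf_le (F : Forest) (q : String) :
    sizeOf (pvChildD F q) ≤ sizeOf F := by
  induction F with
  | nil => simp [pvChildD]
  | cons k c r ih =>
    simp only [pvChildD]
    split
    · simp; omega
    · simp; omega

theorem pvChildD_sizeOf_lt (F : Forest) (q : String) :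
    F = Forest.nil ∨ sizeOf (pvChildD F q) < sizeOf F := by
  cases F with
  | nil => exact Or.inl rfl
  | cons k c r =>
    right
    simp only [pvChildD]
    split
    · simp; omega
    · have := pvChildD_sizeOf_le r q; simp; omega

-- [p for p in path.split("/") if p]; sep "/" ≠ "" so split? is always `some`, getD totalizes
def pvParts (path : String) : List String :=
  ((PySem.Str.split? path "/").getD []).filter (fun p => p != "")

def pvWalkKeys : Forest → List String → String → List String
  | _, [], _ => []
  | F, k :: rest, pfx =>
    -- is_last = (idx == len(keys) - 1): positionally, the last key of the sorted key list
    let isLast := rest.isEmpty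
    let connector := if isLast then "└── " else "├── "
    let nextPrefix := pfx ++ (if isLast then "    " else "│   ")
    (pfx ++ connector ++ k) ::
      (pvWalkKeys (pvChildD F k)
          (PySem.List.sorted (pvKeys (pvChildD F k)) (fun x => x) false) nextPrefix
        ++ pvWalkKeys F rest pfx)
termination_by F ks _ => (sizeOf F, ks.length)
decreasing_by
  · rcases pvChildD_sizeOf_lt F k with h | h
    · rw [h]
      apply Prod.Lex.right
      simp [pvChildD, pvKeys, PySem.List.sorted]
    · exact Prod.Lex.left _ _ h
  · apply Prod.Lex.right; simp

def pvWalk (F : Forest) (pfx : String) : List String :=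
  pvWalkKeys F (PySem.List.sorted (pvKeys F) (fun x => x) false) pfx

def get_file_tree (files : List String) : String :=
  let tree := (PySem.List.sorted files (fun x => x) false).foldl
      (fun t path => pvInsert t (pvParts path)) Forest.nil
  PySem.Str.join "\n" ("." :: pvWalk tree "")

-- ===== PORT B =====
def pvM (L : List (List String)) : Nat := (L.map (fun u => u.length + 1)).sum

theorem pvM_cons (u : List String) (l : List (List String)) :
    pvM (u :: l) = u.length + 1 + pvM l := by simp [pvM]

theorem pvM_sublist_le {l₁ l₂ : List (List String)} (h : l₁.Sublist l₂) : pvM l₁ ≤ pvM l₂ := by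
  induction h with
  | slnil => simp [pvM]
  | cons a _ ih => simp only [pvM, List.map_cons, List.sum_cons] at *; omega
  | cons₂ a _ ih => simp only [pvM, List.map_cons, List.sum_cons] at *; omega

theorem pvM_group_le (l : List (List String)) :
    pvM ((l.filter (fun u => decide (1 < u.length))).map List.tail) + l.length ≤ pvM l := by
  induction l with
  | nil => simp [pvM]
  | cons u l ih =>
    rw [List.filter_cons, pvM_cons]
    by_cases h : 1 < u.length
    · simp only [h, decide_true, if_true, List.map_cons, pvM_cons]
      have : u.tail.length = u.length - 1 := by simp
      simp only [List.length_cons]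
      omega
    · rw [decide_eq_false h]
      simp only [Bool.false_eq_true, if_false, List.length_cons]
      omega

def pvRender : List (List String) → String → List String
  | [], _ => []
  | [] :: _, _ => []   -- unreachable here: every path tuple is nonempty (Python would raise IndexError)
  | (k :: kr) :: ts, pfx =>
    let grp := ((k :: kr) :: ts).takeWhile (fun u => u.head? == some k)
    let rest := ((k :: kr) :: ts).dropWhile (fun u => u.head? == some k)
    let group := (grp.filter (fun u => decide (1 < u.length))).map List.tail
    let isLast := rest.isEmpty
    (pfx ++ (if isLast then "└── " else "├── ") ++ k)
      :: (pvRender group (pfx ++ (if isLast then "    " else "│   ")) ++ pvRender rest pfx)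
termination_by L _ => pvM L
decreasing_by
  · have h1 := pvM_group_le (((k :: kr) :: ts).takeWhile (fun u => u.head? == some k))
    have h2 := pvM_sublist_le (List.takeWhile_sublist (l := (k :: kr) :: ts) (fun u => u.head? == some k))
    have h3 : (((k :: kr) :: ts).takeWhile (fun u => u.head? == some k)).length ≥ 1 := by
      rw [List.takeWhile_cons_of_pos (by simp)]; simp
    omega
  · rw [List.dropWhile_cons_of_pos (by simp)]
    have h2 := pvM_sublist_le (List.dropWhile_sublist (l := ts) (fun u => u.head? == some k))
    rw [pvM_cons]
    omega

def get_file_tree_alt (files : List String) : String :=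
  let paths := PySem.List.sorted
      (PySem.Set.diff (PySem.Set.ofList (files.map (fun f => pvParts f))) [[]]) (fun x => x) false
  PySem.Str.join "\n" ("." :: pvRender paths "")

-- ===== PRECONDITION & SPEC =====
def Spec_get_file_tree (files : List String) (out : String) : Prop := out = get_file_tree_alt files
instance (files : List String) (out : String) : Decidable (Spec_get_file_tree files out) := by unfold Spec_get_file_tree; infer_instance

-- ===== CLAIM (what is proved, stated in full; the proofs are below) =====
def Claim_equal_get_file_tree : Prop := ∀ (files : List String), Dom_get_file_tree files → Spec_get_file_tree files (get_file_tree files)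

-- ===== LEMMAS AND PROOFS =====

def pvSub (L : List (List String)) (k : String) : List (List String) :=
  (L.filter (fun u => u.head? == some k)).map List.tail

def pvTails (S : List (List String)) (k : String) : List (List String) :=
  (pvSub S k).filter (fun u => u != [])

theorem pvM_sub_le (L : List (List String)) (k : String) : pvM (pvSub L k) ≤ pvM L := by
  induction L with
  | nil => simp [pvSub, pvM]
  | cons u l ih =>
    rw [pvM_cons]
    simp only [pvSub, List.filter_cons]
    split
    · rw [List.map_cons, pvM_cons]
      have : u.tail.length ≤ u.length := by simp
      simp only [pvSub] at ih; omega
    · simp only [pvSub] at ih; omega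

theorem pvM_sub_lt (L : List (List String)) (k : String)
    (h : ∃ t ∈ L, t.head? = some k) : pvM (pvSub L k) < pvM L := by
  induction L with
  | nil => simp at h
  | cons u l ih =>
    rw [pvM_cons]
    simp only [pvSub, List.filter_cons]
    rcases h with ⟨t, ht, hh⟩
    rcases List.mem_cons.mp ht with rfl | htl
    · rw [if_pos (by simp [hh])]
      rw [List.map_cons, pvM_cons]
      have h1 : t.length = t.tail.length + 1 := by cases t with
        | nil => simp at hh
        | cons a l => simp
      have h2 := pvM_sub_le l k
      simp only [pvSub] at h2; omega
    · have h2 := ih ⟨t, htl, hh⟩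
      simp only [pvSub] at h2
      split
      · rw [List.map_cons, pvM_cons]
        have : u.tail.length ≤ u.length := by simp
        omega
      · omega

theorem pvM_tails_lt (S : List (List String)) (k : String)
    (h : ∃ t ∈ S, t.head? = some k) : pvM (pvTails S k) < pvM S :=
  lt_of_le_of_lt (pvM_sublist_le List.filter_sublist) (pvM_sub_lt S k h)

def pvRep : Forest → List (List String) → Prop :=
  fun F S =>
    S.Pairwise (· < ·) ∧ (∀ t ∈ S, t ≠ []) ∧ (pvKeys F).Nodup ∧
    (∀ x, x ∈ pvKeys F ↔ ∃ t ∈ S, t.head? = some x) ∧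
    (∀ k, (∃ t ∈ S, t.head? = some k) → pvRep (pvChildD F k) (pvTails S k))
termination_by F S => pvM S
decreasing_by exact pvM_tails_lt _ _ (by assumption)

theorem pvRep_iff (F : Forest) (S : List (List String)) :
    pvRep F S ↔
    (S.Pairwise (· < ·) ∧ (∀ t ∈ S, t ≠ []) ∧ (pvKeys F).Nodup ∧
     (∀ x, x ∈ pvKeys F ↔ ∃ t ∈ S, t.head? = some x) ∧
     (∀ k, (∃ t ∈ S, t.head? = some k) → pvRep (pvChildD F k) (pvTails S k))) := by
  rw [pvRep]

-- instance normalisation: the ports' `sorted` under the canonical LinearOrder instance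
theorem pvBridge {γ : Type} [li : LinearOrder γ] (i : LT γ) (d : (a b : γ) → Decidable (@LT.lt γ i a b))
    (h : i = li.toLT) (xs : List γ) :
    @PySem.List.sorted γ γ i d xs (fun x => x) false
      = @PySem.List.sorted γ γ li.toLT (@LinearOrder.toDecidableLT γ li) xs (fun x => x) false := by
  subst h
  have hd : d = @LinearOrder.toDecidableLT γ li := by
    funext a b; exact Subsingleton.elim _ _
  rw [hd]

theorem pvSorted_pairwise_lt {γ : Type} [LinearOrder γ] (xs : List γ) (h : xs.Nodup) :
    (@PySem.List.sorted γ γ _ (@LinearOrder.toDecidableLT γ _) xs (fun x => x) false).Pairwise (· < ·) := by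
  have hp := PySem.List.sorted_pairwise (κ := γ) xs (fun x => x)
  have hn : (PySem.List.sorted (κ := γ) xs (fun x => x) false).Nodup :=
    (PySem.List.sorted_perm xs (fun x => x) false).nodup_iff.mpr h
  exact (hp.and hn).imp (fun hx => lt_of_le_of_ne hx.1 hx.2)

theorem pvSsorted_ext {γ : Type} [LinearOrder γ] {a b : List γ}
    (ha : a.Pairwise (· < ·)) (hb : b.Pairwise (· < ·)) (h : ∀ x, x ∈ a ↔ x ∈ b) : a = b := by
  have hna : a.Nodup := ha.imp (fun h => ne_of_lt h)
  have hnb : b.Nodup := hb.imp (fun h => ne_of_lt h)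
  have hperm : a.Perm b := (List.perm_ext_iff_of_nodup hna hnb).mpr h
  exact hperm.eq_of_pairwise
    (by intro x y _ _ h1 h2; exact le_antisymm h1 h2)
    (ha.imp le_of_lt) (hb.imp le_of_lt)

-- insert / build lemmas
theorem pvInsert_nilList (F : Forest) : pvInsert F [] = F := by
  cases F <;> simp [pvInsert]

theorem keys_insert_mem (F : Forest) (u : List String) (x : String) :
    x ∈ pvKeys (pvInsert F u) ↔ x ∈ pvKeys F ∨ u.head? = some x := by
  cases u with
  | nil => simp [pvInsert_nilList]
  | cons p ps =>
    induction F with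
    | nil => simp [pvInsert, pvKeys, eq_comm]
    | cons k c r ihc ihr =>
      have hins : pvInsert (Forest.cons k c r) (p :: ps)
          = if k = p then Forest.cons k (pvInsert c ps) r
            else Forest.cons k c (pvInsert r (p :: ps)) := by
        simp [pvInsert]
      rw [hins]
      by_cases hk : k = p
      · rw [if_pos hk]
        subst hk
        simp only [pvKeys, List.head?_cons, Option.some.injEq, List.mem_cons]
        constructor
        · rintro (rfl | h)
          · exact Or.inl (Or.inl rfl)
          · exact Or.inl (Or.inr h)
        · rintro ((rfl | h) | rfl)
          · exact Or.inl rfl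
          · exact Or.inr h
          · exact Or.inl rfl
      · rw [if_neg hk]
        simp only [pvKeys, List.mem_cons, List.head?_cons] at ihr ⊢
        rw [ihr]
        tauto

theorem nodup_keys_insert (F : Forest) (u : List String) (h : (pvKeys F).Nodup) :
    (pvKeys (pvInsert F u)).Nodup := by
  cases u with
  | nil => simpa [pvInsert_nilList]
  | cons p ps =>
    induction F with
    | nil => simp [pvInsert, pvKeys]
    | cons k c r ihc ihr =>
      have hins : pvInsert (Forest.cons k c r) (p :: ps)
          = if k = p then Forest.cons k (pvInsert c ps) r
            else Forest.cons k c (pvInsert r (p :: ps)) := by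
        simp [pvInsert]
      rw [hins]
      by_cases hk : k = p
      · rw [if_pos hk]
        simpa only [pvKeys] using h
      · rw [if_neg hk]
        simp only [pvKeys, List.nodup_cons] at h ⊢
        refine ⟨?_, ihr h.2⟩
        rw [keys_insert_mem]
        simp only [List.head?_cons, Option.some.injEq]
        rintro (hmem | rfl)
        · exact h.1 hmem
        · exact hk rfl

theorem childD_insert (F : Forest) (p : String) (ps : List String) (q : String) :
    pvChildD (pvInsert F (p :: ps)) q
      = if p = q then pvInsert (pvChildD F p) ps else pvChildD F q := by
  have hch : ∀ (k' : String) (c' r' : Forest) (q' : String),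
      pvChildD (Forest.cons k' c' r') q' = if k' = q' then c' else pvChildD r' q' :=
    fun _ _ _ _ => rfl
  induction F with
  | nil =>
    have hins : pvInsert Forest.nil (p :: ps)
        = Forest.cons p (pvInsert Forest.nil ps) Forest.nil := by
      simp [pvInsert]
    rw [hins, hch]
    simp [pvChildD]
  | cons k c r ihc ihr =>
    have hins : pvInsert (Forest.cons k c r) (p :: ps)
        = if k = p then Forest.cons k (pvInsert c ps) r
          else Forest.cons k c (pvInsert r (p :: ps)) := by
      simp [pvInsert]
    rw [hins]
    by_cases hk : k = p
    · subst hk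
      rw [if_pos rfl]
      by_cases hq : k = q
      · subst hq; simp [hch]
      · simp [hch, hq]
    · rw [if_neg hk]
      by_cases hq : k = q
      · subst hq
        have h2 : ¬ (p = k) := fun h => hk h.symm
        simp [hch, h2]
      · simp [hch, hq, hk, ihr]

theorem keys_build_mem (L : List (List String)) (F : Forest) (x : String) :
    x ∈ pvKeys (L.foldl pvInsert F) ↔ x ∈ pvKeys F ∨ ∃ t ∈ L, t.head? = some x := by
  induction L generalizing F with
  | nil => simp
  | cons u L ih =>
    rw [List.foldl_cons, ih, keys_insert_mem]
    simp only [List.mem_cons]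
    constructor
    · rintro ((h | h) | ⟨t, ht, hh⟩)
      · exact Or.inl h
      · exact Or.inr ⟨u, Or.inl rfl, h⟩
      · exact Or.inr ⟨t, Or.inr ht, hh⟩
    · rintro (h | ⟨t, (rfl | ht), hh⟩)
      · exact Or.inl (Or.inl h)
      · exact Or.inl (Or.inr hh)
      · exact Or.inr ⟨t, ht, hh⟩

theorem nodup_keys_build (L : List (List String)) (F : Forest) (h : (pvKeys F).Nodup) :
    (pvKeys (L.foldl pvInsert F)).Nodup := by
  induction L generalizing F with
  | nil => simpa
  | cons u L ih => exact ih _ (nodup_keys_insert F u h)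

theorem childD_build (L : List (List String)) (F : Forest) (k : String) :
    pvChildD (L.foldl pvInsert F) k = (pvSub L k).foldl pvInsert (pvChildD F k) := by
  induction L generalizing F with
  | nil => simp [pvSub]
  | cons u L ih =>
    rw [List.foldl_cons, ih]
    cases u with
    | nil =>
      rw [pvInsert_nilList]
      simp [pvSub]
    | cons p ps =>
      rw [childD_insert]
      by_cases hp : p = k
      · subst hp
        rw [if_pos rfl]
        simp only [pvSub, List.filter_cons, List.head?_cons, beq_self_eq_true, if_true,
          List.map_cons, List.foldl_cons, List.tail_cons]
      · rw [if_neg hp]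
        simp only [pvSub, List.filter_cons, List.head?_cons]
        rw [if_neg (by simp [hp])]

-- canon: sorted(set(L) - {()}) — exactly the list port B sorts
def pvCanon (L : List (List String)) : List (List String) :=
  PySem.List.sorted (PySem.Set.diff (PySem.Set.ofList L) [[]]) (fun x => x) false

theorem mem_sub (L : List (List String)) (k : String) (u : List String) :
    u ∈ pvSub L k ↔ ∃ t ∈ L, t.head? = some k ∧ t.tail = u := by
  simp [pvSub, List.mem_map, List.mem_filter]
  tauto

theorem mem_tails (S : List (List String)) (k : String) (u : List String) :
    u ∈ pvTails S k ↔ (∃ t ∈ S, t.head? = some k ∧ t.tail = u) ∧ u ≠ [] := by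
  simp [pvTails, List.mem_filter, mem_sub]

theorem mem_canon (L : List (List String)) (t : List String) :
    t ∈ pvCanon L ↔ t ∈ L ∧ t ≠ [] := by
  rw [pvCanon, PySem.List.mem_sorted, PySem.Set.mem_diff, PySem.Set.mem_ofList]
  simp

theorem pairwise_lt_conv {l : List (List String)} :
    l.Pairwise (fun a b : List String =>
      @LT.lt _ (List.instLinearOrder.toLT) a b) ↔ l.Pairwise (· < ·) :=
  Iff.rfl

theorem canon_pairwise (L : List (List String)) : (pvCanon L).Pairwise (· < ·) := by
  rw [pvCanon, pvBridge _ _ rfl]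
  rw [← pairwise_lt_conv]
  exact pvSorted_pairwise_lt _ (PySem.Set.nodup_diff _ _ (PySem.Set.nodup_ofList L))

theorem head_eq_some_ne_nil {t : List String} {k : String} (h : t.head? = some k) : t ≠ [] := by
  rintro rfl; simp at h

theorem tail_lt_tail {u v : List String} {k : String}
    (hu : u.head? = some k) (hv : v.head? = some k) (h : u < v) : u.tail < v.tail := by
  cases u with
  | nil => simp at hu
  | cons a u' =>
    cases v with
    | nil => simp at hv
    | cons b v' =>
      simp only [List.head?_cons, Option.some.injEq] at hu hv
      subst hu; subst hv
      simpa using h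

theorem canon_tails (L : List (List String)) (k : String) :
    pvTails (pvCanon L) k = pvCanon (pvSub L k) := by
  apply pvSsorted_ext (γ := List String)
  · -- pairwise < of the tails of the canon elements with head k
    have h0 := canon_pairwise L
    have h1 : ((pvCanon L).filter (fun u => u.head? == some k)).Pairwise (· < ·) :=
      h0.filter _
    have h2 : (((pvCanon L).filter (fun u => u.head? == some k)).map List.tail).Pairwise (· < ·) := by
      rw [List.pairwise_map]
      refine h1.imp_of_mem ?_
      intro a b ha hb hab
      have hha : a.head? = some k := by simpa using (List.mem_filter.mp ha).2
      have hhb : b.head? = some k := by simpa using (List.mem_filter.mp hb).2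
      exact tail_lt_tail hha hhb hab
    have h2' : (pvSub (pvCanon L) k).Pairwise (· < ·) := h2
    exact List.Pairwise.sublist List.filter_sublist h2'
  · exact canon_pairwise (pvSub L k)
  · intro u
    rw [mem_tails, mem_canon, mem_sub]
    constructor
    · rintro ⟨⟨t, ht, hh, rfl⟩, hne⟩
      exact ⟨⟨t, ((mem_canon L t).mp ht).1, hh, rfl⟩, hne⟩
    · rintro ⟨⟨t, ht, hh, rfl⟩, hne⟩
      exact ⟨⟨t, (mem_canon L t).mpr ⟨ht, head_eq_some_ne_nil hh⟩, hh, rfl⟩, hne⟩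

theorem rep_build : ∀ (n : Nat) (L : List (List String)), pvM L ≤ n →
    pvRep (L.foldl pvInsert Forest.nil) (pvCanon L) := by
  intro n
  induction n using Nat.strong_induction_on with
  | _ n ih =>
    intro L hM
    rw [pvRep_iff]
    refine ⟨canon_pairwise L, ?_, ?_, ?_, ?_⟩
    · intro t ht; exact ((mem_canon L t).mp ht).2
    · exact nodup_keys_build L Forest.nil (by simp [pvKeys])
    · intro x
      rw [keys_build_mem]
      have hknil : pvKeys Forest.nil = [] := rfl
      rw [hknil]
      simp only [List.not_mem_nil, false_or]
      constructor
      · rintro ⟨t, ht, hh⟩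
        exact ⟨t, (mem_canon L t).mpr ⟨ht, head_eq_some_ne_nil hh⟩, hh⟩
      · rintro ⟨t, ht, hh⟩
        exact ⟨t, ((mem_canon L t).mp ht).1, hh⟩
    · intro k hk
      rw [childD_build]
      have hcd : pvChildD Forest.nil k = Forest.nil := rfl
      rw [hcd, canon_tails]
      rcases hk with ⟨t, ht, hh⟩
      have ht' := (mem_canon L t).mp ht
      have hlt : pvM (pvSub L k) < pvM L := pvM_sub_lt L k ⟨t, ht'.1, hh⟩
      exact ih (pvM (pvSub L k)) (by omega) (pvSub L k) le_rfl

theorem pvM_append (a b : List (List String)) : pvM (a ++ b) = pvM a + pvM b := by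
  simp [pvM]

theorem pairwise_lt_convS {l : List String} :
    l.Pairwise (fun a b : String => @LT.lt _ (String.instLinearOrder.toLT) a b) ↔ l.Pairwise (· < ·) :=
  Iff.rfl

theorem head_le_of_lt {t u : List String} {x y : String}
    (ht : t.head? = some x) (hu : u.head? = some y) (h : t < u) : x ≤ y := by
  cases t with
  | nil => simp at ht
  | cons a t' =>
    cases u with
    | nil => simp at hu
    | cons b u' =>
      simp only [List.head?_cons, Option.some.injEq] at ht hu
      subst ht; subst hu
      rcases List.cons_lt_cons_iff.mp h with h1 | ⟨rfl, _⟩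
      · exact le_of_lt h1
      · exact le_rfl

theorem sorted_keys_hyps (F : Forest) (S : List (List String)) (h : pvRep F S) :
    (PySem.List.sorted (pvKeys F) (fun x => x) false).Pairwise (· < ·) ∧
    (∀ x, x ∈ PySem.List.sorted (pvKeys F) (fun x => x) false ↔ ∃ t ∈ S, t.head? = some x) := by
  obtain ⟨-, -, hnd, hmem, -⟩ := (pvRep_iff F S).mp h
  constructor
  · rw [pvBridge _ _ rfl, ← pairwise_lt_convS]
    exact pvSorted_pairwise_lt _ hnd
  · intro x
    rw [PySem.List.mem_sorted]
    exact hmem x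

theorem walk_render : ∀ (n : Nat) (S : List (List String)) (F : Forest) (ks : List String) (pfx : String),
    pvM S ≤ n →
    S.Pairwise (· < ·) → (∀ t ∈ S, t ≠ []) →
    ks.Pairwise (· < ·) →
    (∀ x, x ∈ ks ↔ ∃ t ∈ S, t.head? = some x) →
    (∀ k, (∃ t ∈ S, t.head? = some k) → pvRep (pvChildD F k) (pvTails S k)) →
    pvWalkKeys F ks pfx = pvRender S pfx := by
  intro n
  induction n using Nat.strong_induction_on with
  | _ n ih =>
    intro S F ks pfx hM hS hne hks hksmem hrep
    cases S with
    | nil =>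
      have hks0 : ks = [] := by
        rw [List.eq_nil_iff_forall_not_mem]
        intro x hx
        rcases (hksmem x).mp hx with ⟨t, ht, -⟩
        simp at ht
      subst hks0
      simp [pvWalkKeys, pvRender]
    | cons t ts =>
      have hT : t ≠ [] := hne t List.mem_cons_self
      obtain ⟨k0, kr, rfl⟩ : ∃ k0 kr, t = k0 :: kr := by
        cases t with
        | nil => exact absurd rfl hT
        | cons a b => exact ⟨a, b, rfl⟩
      have hpt : ((fun u : List String => u.head? == some k0) (k0 :: kr)) = true := by simp
      -- facts about the group (k0::kr) :: ts.takeWhile and the remainder ts.dropWhile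
      have hSdecomp : ((k0 :: kr) :: ts.takeWhile (fun u => u.head? == some k0))
          ++ ts.dropWhile (fun u => u.head? == some k0) = (k0 :: kr) :: ts := by
        simp [List.takeWhile_append_dropWhile]
      have hgrp_mem : ∀ u ∈ (k0 :: kr) :: ts.takeWhile (fun u => u.head? == some k0),
          u.head? = some k0 := by
        intro u hu
        rcases List.mem_cons.mp hu with rfl | hu'
        · rfl
        · simpa using List.mem_takeWhile_imp hu'
      have hrest_sub : (ts.dropWhile (fun u => u.head? == some k0)).Sublist ts :=
        List.dropWhile_sublist _
      have hts_lt : ∀ u ∈ ts, (k0 :: kr) < u := (List.pairwise_cons.mp hS).1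
      have hhead_ge : ∀ u ∈ ts, ∀ y, u.head? = some y → k0 ≤ y := by
        intro u hu y hy
        exact head_le_of_lt rfl hy (hts_lt u hu)
      have hrest_mem_S : ∀ u ∈ ts.dropWhile (fun u => u.head? == some k0),
          u ∈ (k0 :: kr) :: ts := fun u hu => List.mem_cons_of_mem _ (hrest_sub.mem hu)
      have hrest_pw : (ts.dropWhile (fun u => u.head? == some k0)).Pairwise (· < ·) :=
        (List.pairwise_cons.mp hS).2.sublist hrest_sub
      have hrest_gt : ∀ u ∈ ts.dropWhile (fun u => u.head? == some k0),
          ∀ y, u.head? = some y → k0 < y := by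
        cases hr : ts.dropWhile (fun u => u.head? == some k0) with
        | nil => intro u hu; simp at hu
        | cons v vs =>
          have hv : (v.head? == some k0) = false := by
            have h0 := List.head?_dropWhile_not (fun u : List String => u.head? == some k0) ts
            rw [hr] at h0
            simpa using h0
          intro u hu y hy
          have humem : u ∈ ts := hrest_sub.mem (hr ▸ hu)
          have h1 : k0 ≤ y := hhead_ge u humem y hy
          rcases List.mem_cons.mp hu with rfl | hmem
          · have h2 : y ≠ k0 := by
              intro h2; rw [h2] at hy; rw [hy] at hv; simp at hv
            exact lt_of_le_of_ne h1 (Ne.symm h2)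
          · have hvmem : v ∈ ts := hrest_sub.mem (hr ▸ List.mem_cons_self)
            have hvne : v ≠ [] := hne v (List.mem_cons_of_mem _ hvmem)
            obtain ⟨a, v', rfl⟩ : ∃ a v', v = a :: v' := by
              cases v with
              | nil => exact absurd rfl hvne
              | cons a b => exact ⟨a, b, rfl⟩
            have ha1 : k0 ≤ a := hhead_ge _ hvmem a rfl
            have ha2 : a ≠ k0 := by
              intro h2; rw [h2] at hv; simp at hv
            have hvu : (a :: v') < u := by
              have hpw := List.pairwise_cons.mp (hr ▸ hrest_pw)
              exact hpw.1 u hmem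
            have ha3 : a ≤ y := head_le_of_lt rfl hy hvu
            exact lt_of_lt_of_le (lt_of_le_of_ne ha1 (Ne.symm ha2)) ha3
      -- ks = k0 :: ks'
      have hk0_mem : k0 ∈ ks := (hksmem k0).mpr ⟨k0 :: kr, List.mem_cons_self, rfl⟩
      have hks_min : ∀ x ∈ ks, k0 ≤ x := by
        intro x hx
        rcases (hksmem x).mp hx with ⟨u, hu, hy⟩
        rcases List.mem_cons.mp hu with rfl | hu'
        · simp at hy; exact le_of_eq hy
        · exact hhead_ge u hu' x hy
      obtain ⟨a, ks', rfl⟩ : ∃ a ks', ks = a :: ks' := by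
        cases ks with
        | nil => simp at hk0_mem
        | cons a b => exact ⟨a, b, rfl⟩
      have ha : a = k0 := by
        have h1 : k0 ≤ a := hks_min a List.mem_cons_self
        rcases List.mem_cons.mp hk0_mem with h2 | h2
        · exact h2.symm
        · have := (List.pairwise_cons.mp hks).1 k0 h2
          exact absurd this (not_lt_of_ge h1)
      subst ha
      have hks'_pw : ks'.Pairwise (· < ·) := (List.pairwise_cons.mp hks).2
      have hks'_gt : ∀ x ∈ ks', a < x := (List.pairwise_cons.mp hks).1
      have hks'_mem : ∀ x, x ∈ ks' ↔
          ∃ u ∈ ts.dropWhile (fun u => u.head? == some a), u.head? = some x := by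
        intro x
        constructor
        · intro hx
          have hxk : a < x := hks'_gt x hx
          rcases (hksmem x).mp (List.mem_cons_of_mem _ hx) with ⟨u, hu, hy⟩
          rcases (by rw [← hSdecomp] at hu; exact List.mem_append.mp hu) with hug | hur
          · have hgm := hgrp_mem u hug
            rw [hgm] at hy
            simp at hy
            exact absurd hy (ne_of_lt hxk)
          · exact ⟨u, hur, hy⟩
        · rintro ⟨u, hu, hy⟩
          have hx : x ∈ a :: ks' := (hksmem x).mpr ⟨u, hrest_mem_S u hu, hy⟩
          rcases List.mem_cons.mp hx with rfl | h
          · exact absurd (hrest_gt u hu x hy) (lt_irrefl x)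
          · exact h
      have hlast : ks'.isEmpty = (ts.dropWhile (fun u => u.head? == some a)).isEmpty := by
        cases hk : ks' with
        | nil =>
          cases hr : ts.dropWhile (fun u => u.head? == some a) with
          | nil => rfl
          | cons v vs =>
            exfalso
            have hvS : v ∈ ts.dropWhile (fun u => u.head? == some a) := hr ▸ List.mem_cons_self
            have hvne : v ≠ [] := hne v (hrest_mem_S v hvS)
            obtain ⟨y, vy, rfl⟩ : ∃ y vy, v = y :: vy := by
              cases v with
              | nil => exact absurd rfl hvne
              | cons y vy => exact ⟨y, vy, rfl⟩
            have hy : y ∈ ks' := (hks'_mem y).mpr ⟨_, hvS, rfl⟩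
            rw [hk] at hy
            simp at hy
        | cons x xs =>
          cases hr : ts.dropWhile (fun u => u.head? == some a) with
          | nil =>
            have hx := (hks'_mem x).mp (hk ▸ List.mem_cons_self)
            rw [hr] at hx
            simp at hx
          | cons v vs => rfl
      -- the group B recurses into is exactly pvTails S a
      have hfilter_S : ((a :: kr) :: ts).filter (fun u => u.head? == some a)
          = (a :: kr) :: ts.takeWhile (fun u => u.head? == some a) := by
        rw [← hSdecomp, List.filter_append]
        have h1 : ((a :: kr) :: ts.takeWhile (fun u => u.head? == some a)).filter
            (fun u => u.head? == some a) = (a :: kr) :: ts.takeWhile (fun u => u.head? == some a) :=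
          List.filter_eq_self.mpr (fun u hu => by simp [hgrp_mem u hu])
        have h2 : (ts.dropWhile (fun u => u.head? == some a)).filter
            (fun u => u.head? == some a) = [] := by
          rw [List.filter_eq_nil_iff]
          intro u hu
          cases hu' : u.head? with
          | none => simp
          | some y =>
            have := hrest_gt u hu y hu'
            simp only [beq_iff_eq, Option.some.injEq]
            exact ne_of_gt this
        rw [h1, h2, List.append_nil]
      have hgroup : (((a :: kr) :: ts.takeWhile (fun u => u.head? == some a)).filter
            (fun u => decide (1 < u.length))).map List.tail
          = pvTails ((a :: kr) :: ts) a := by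
        rw [pvTails, pvSub, hfilter_S, List.filter_map]
        congr 1
        apply List.filter_congr
        intro u hu
        have hhu := hgrp_mem u hu
        cases u with
        | nil => simp at hhu
        | cons y u' => cases u' <;> simp [Function.comp]
      -- child recursion
      have hrepc : pvRep (pvChildD F a) (pvTails ((a :: kr) :: ts) a) :=
        hrep a ⟨a :: kr, List.mem_cons_self, rfl⟩
      obtain ⟨c1, c2, c3, c4, c5⟩ := (pvRep_iff _ _).mp hrepc
      have hMc : pvM (pvTails ((a :: kr) :: ts) a) < n :=
        lt_of_lt_of_le (pvM_tails_lt _ _ ⟨a :: kr, List.mem_cons_self, rfl⟩) hM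
      have hkeysc := sorted_keys_hyps _ _ hrepc
      have hwalkc : ∀ pfx', pvWalkKeys (pvChildD F a)
          (PySem.List.sorted (pvKeys (pvChildD F a)) (fun x => x) false) pfx'
          = pvRender (pvTails ((a :: kr) :: ts) a) pfx' := by
        intro pfx'
        exact ih _ hMc _ _ _ _ le_rfl c1 c2 hkeysc.1 hkeysc.2 c5
      -- rest recursion
      have hMr : pvM (ts.dropWhile (fun u => u.head? == some a)) < n := by
        have hsum : pvM ((a :: kr) :: ts)
            = pvM ((a :: kr) :: ts.takeWhile (fun u => u.head? == some a))
              + pvM (ts.dropWhile (fun u => u.head? == some a)) := by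
          rw [← hSdecomp, pvM_append]
        have hg : 1 ≤ pvM ((a :: kr) :: ts.takeWhile (fun u => u.head? == some a)) := by
          rw [pvM_cons]; omega
        omega
      have hrestne : ∀ u ∈ ts.dropWhile (fun u => u.head? == some a), u ≠ [] :=
        fun u hu => hne u (hrest_mem_S u hu)
      have htails_rest : ∀ k, (∃ u ∈ ts.dropWhile (fun u => u.head? == some a), u.head? = some k) →
          pvTails (ts.dropWhile (fun u => u.head? == some a)) k = pvTails ((a :: kr) :: ts) k := by
        rintro k ⟨u, hu, hy⟩
        have hk0k : a < k := hrest_gt u hu k hy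
        rw [pvTails, pvTails, pvSub, pvSub, ← hSdecomp, List.filter_append]
        have h2 : ((a :: kr) :: ts.takeWhile (fun u => u.head? == some a)).filter
            (fun w => w.head? == some k) = [] := by
          rw [List.filter_eq_nil_iff]
          intro w hw
          have := hgrp_mem w hw
          simp [this]
          exact ne_of_lt hk0k
        rw [h2, List.nil_append]
      have hrestrep : ∀ k, (∃ u ∈ ts.dropWhile (fun u => u.head? == some a), u.head? = some k) →
          pvRep (pvChildD F k) (pvTails (ts.dropWhile (fun u => u.head? == some a)) k) := by
        intro k hk
        rw [htails_rest k hk]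
        rcases hk with ⟨u, hu, hy⟩
        exact hrep k ⟨u, hrest_mem_S u hu, hy⟩
      have hwalkr : pvWalkKeys F ks' pfx = pvRender (ts.dropWhile (fun u => u.head? == some a)) pfx :=
        ih _ hMr _ _ _ _ le_rfl hrest_pw hrestne hks'_pw hks'_mem hrestrep
      -- unfold one step of each side and assemble
      rw [pvWalkKeys, pvRender]
      rw [List.takeWhile_cons_of_pos (p := fun u : List String => u.head? == some a) (by simp),
        List.dropWhile_cons_of_pos (p := fun u : List String => u.head? == some a) (by simp)]
      rw [hlast, hgroup, hwalkc, hwalkr]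

theorem walk_of_rep (F : Forest) (S : List (List String)) (pfx : String) (h : pvRep F S) :
    pvWalk F pfx = pvRender S pfx := by
  obtain ⟨c1, c2, c3, c4, c5⟩ := (pvRep_iff F S).mp h
  have hk := sorted_keys_hyps F S h
  rw [pvWalk]
  exact walk_render (pvM S) S F _ pfx le_rfl c1 c2 hk.1 hk.2 c5

-- ===== VERDICT (by name: the statement is the Claim_ definition above) =====
theorem get_file_tree_spec : Claim_equal_get_file_tree := by
  intro files _
  unfold Spec_get_file_tree
  have ha0 : get_file_tree files = PySem.Str.join "\n"
      ("." :: pvWalk ((PySem.List.sorted files (fun x => x) false).foldl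
        (fun t path => pvInsert t (pvParts path)) Forest.nil) "") := rfl
  have hb0 : get_file_tree_alt files = PySem.Str.join "\n"
      ("." :: pvRender (pvCanon (files.map (fun f => pvParts f))) "") := rfl
  have hfold : (PySem.List.sorted files (fun x => x) false).foldl
        (fun t path => pvInsert t (pvParts path)) Forest.nil
      = ((PySem.List.sorted files (fun x => x) false).map pvParts).foldl pvInsert Forest.nil :=
    List.foldl_map.symm
  have hcanon : pvCanon ((PySem.List.sorted files (fun x => x) false).map pvParts)
      = pvCanon (files.map (fun f => pvParts f)) := by
    refine pvSsorted_ext (canon_pairwise _) (canon_pairwise _) ?_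
    intro t
    rw [mem_canon, mem_canon]
    constructor <;> rintro ⟨ht, hn⟩ <;> refine ⟨?_, hn⟩
    · rcases List.mem_map.mp ht with ⟨f, hf, rfl⟩
      exact List.mem_map.mpr ⟨f, (PySem.List.mem_sorted _ _ _ f).mp hf, rfl⟩
    · rcases List.mem_map.mp ht with ⟨f, hf, rfl⟩
      exact List.mem_map.mpr ⟨f, (PySem.List.mem_sorted _ _ _ f).mpr hf, rfl⟩
  rw [ha0, hb0, hfold,
    walk_of_rep _ _ "" (rep_build (pvM (((PySem.List.sorted files (fun x => x) false).map pvParts))) _ le_rfl),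
    hcanon]
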